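-- pv_equiv track=rewrite | github.com/palomaYPR/Bayes | prediction/bayes.py | castingRows
-- ===== SOURCE A (Python) =====
-- def castingRows(rows):
--     final_value = ''
--     i = ''.join(map(str, rows))
--     for j in i:
--         if chr(48) <= j <= chr(57):
--             final_value += str(j)
--     var_fin = int(final_value)
--     return var_fin
-- ===== SOURCE B (Python) =====
-- def castingRows(rows):
--     return int(''.join(str(abs(r)) for r in rows))
-- ===== Notes on version B (the rewrite author's own statement) =====
-- stated objective: simpler
-- what changed: Instead of joining the signed decimal strings and filtering digit characters one by one in a Python loop, B takes abs() of each row so its decimal form is already all digits, joins once and parses once; the per-character scan disappears.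
-- outside the precondition, e.g. on castingRows([]): A raises ValueError, B raises ValueError
import Mathlib
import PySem

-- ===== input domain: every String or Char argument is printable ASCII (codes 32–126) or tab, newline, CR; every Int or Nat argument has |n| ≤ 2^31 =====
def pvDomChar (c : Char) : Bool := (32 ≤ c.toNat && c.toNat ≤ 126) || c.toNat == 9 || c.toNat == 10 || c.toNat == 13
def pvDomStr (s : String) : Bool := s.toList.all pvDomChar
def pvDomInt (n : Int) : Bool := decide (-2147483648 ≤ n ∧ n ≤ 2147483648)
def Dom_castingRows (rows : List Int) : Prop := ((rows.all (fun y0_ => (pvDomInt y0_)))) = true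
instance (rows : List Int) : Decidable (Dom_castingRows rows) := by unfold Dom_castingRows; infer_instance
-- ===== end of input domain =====

-- B replaces A's per-character digit-filtering loop by abs() per row, so str(abs(r)) is already
-- all digits: one join, one int() — simpler, no character scan.

-- ===== PORT A =====
def castingRows (rows : List Int) : Int :=
  let i : List Char := PySem.Chars.join [] (rows.map PySem.Int.toChars)
  let final_value : List Char :=
    i.foldl (fun acc j => if '0' ≤ j ∧ j ≤ '9' then acc ++ [j] else acc) []
  (PySem.Int.ofChars? final_value).getD 0

-- ===== PORT B =====
def castingRows_alt (rows : List Int) : Int :=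
  (PySem.Int.ofChars? (PySem.Chars.join [] (rows.map (fun r => PySem.Int.toChars |r|)))).getD 0

-- ===== PRECONDITION & SPEC =====
-- Pre_ excludes only rows = [], on which Python A raises ValueError (int('')); B raises the same.
def Pre_castingRows (rows : List Int) : Prop := rows ≠ []
instance (rows : List Int) : Decidable (Pre_castingRows rows) := by unfold Pre_castingRows; infer_instance
def pvWitness_castingRows : List Int := ([-12, 0, 345])

def Spec_castingRows (rows : List Int) (out : Int) : Prop := out = castingRows_alt rows
instance (rows : List Int) (out : Int) : Decidable (Spec_castingRows rows out) := by unfold Spec_castingRows; infer_instance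

-- ===== CLAIM (what is proved, stated in full; the proofs are below) =====
def Claim_equal_castingRows : Prop := ∀ (rows : List Int), Dom_castingRows rows → Pre_castingRows rows → Spec_castingRows rows (castingRows rows)

-- ===== LEMMAS AND PROOFS =====

-- every character Nat.toDigitsCore emits (over digit-only accumulated chars) is an ASCII digit
theorem pv_toDigitsCore_digits (fuel n : Nat) (ds : List Char)
    (hds : ∀ c ∈ ds, '0' ≤ c ∧ c ≤ '9') :
    ∀ c ∈ Nat.toDigitsCore 10 fuel n ds, '0' ≤ c ∧ c ≤ '9' := by
  induction fuel generalizing n ds with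
  | zero => exact hds
  | succ fuel ih =>
    have hd : '0' ≤ (n % 10).digitChar ∧ (n % 10).digitChar ≤ '9' := by
      have h : n % 10 < 10 := Nat.mod_lt _ (by omega)
      interval_cases (n % 10) <;> decide
    unfold Nat.toDigitsCore
    simp only []
    have hcons : ∀ c ∈ (n % 10).digitChar :: ds, '0' ≤ c ∧ c ≤ '9' := by
      intro c hc
      rcases List.mem_cons.mp hc with hc | hc
      · simpa [hc] using hd
      · exact hds c hc
    split
    · exact hcons
    · exact ih _ _ hcons

theorem pv_toDigits_digits (n : Nat) : ∀ c ∈ Nat.toDigits 10 n, '0' ≤ c ∧ c ≤ '9' := by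
  exact pv_toDigitsCore_digits (n + 1) n [] (by simp)

-- digit-filtering str(r) is exactly str(abs(r))
theorem pv_filter_toChars (r : Int) :
    (PySem.Int.toChars r).filter (fun j => decide ('0' ≤ j ∧ j ≤ '9')) = PySem.Int.toChars |r| := by
  unfold PySem.Int.toChars
  by_cases hr : r < 0
  · have habs : ¬ |r| < 0 := not_lt.mpr (abs_nonneg r)
    have h1 : |r| = -r := abs_of_neg hr
    have h2 : (-r).natAbs = r.natAbs := by omega
    have h3 : (-r).toNat = r.natAbs := by omega
    rw [if_pos hr, h1, if_neg (h1 ▸ habs), List.filter_cons_of_neg (by decide), h3,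
      List.filter_eq_self.mpr]
    intro c hc
    simpa using pv_toDigits_digits r.natAbs c hc
  · have h1 : |r| = r := abs_of_nonneg (by omega)
    rw [if_neg hr, h1, if_neg hr, List.filter_eq_self.mpr]
    intro c hc
    simpa using pv_toDigits_digits r.toNat c hc

-- ''.join with empty separator is flatten
theorem pv_join_nil_eq_flatten (xss : List (List Char)) :
    PySem.Chars.join [] xss = xss.flatten := by
  unfold PySem.Chars.join
  induction xss with
  | nil => rfl
  | cons x xs ih =>
    cases xs with
    | nil => simp [List.intercalate]
    | cons y ys =>
      simp only [List.intercalate, List.intersperse] at ih ⊢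
      simp [ih]

theorem pv_digit_lists_eq (rows : List Int) :
    (PySem.Chars.join [] (rows.map PySem.Int.toChars)).foldl
        (fun acc j => if '0' ≤ j ∧ j ≤ '9' then acc ++ [j] else acc) []
      = PySem.Chars.join [] (rows.map (fun r => PySem.Int.toChars |r|)) := by
  rw [PySem.List.foldl_append_ite_eq_filter, pv_join_nil_eq_flatten, pv_join_nil_eq_flatten,
    List.nil_append, List.filter_flatten, List.map_map]
  exact congrArg _ (List.map_congr_left (fun r _ => pv_filter_toChars r))

-- ===== VERDICT (by name: the statement is the Claim_ definition above) =====
theorem castingRows_spec : Claim_equal_castingRows := by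
  intro rows _ _
  unfold Spec_castingRows castingRows castingRows_alt
  simp only [pv_digit_lists_eq]
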